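-- pv_equiv track=rewrite | github.com/habedi77/maximum-matching | maximum_matching/algorithms/Matching.py | is_valid_match
-- ===== SOURCE A (Python) =====
-- def is_valid_match(max_matching: [], edge: []):
--     v1 = edge[0]
--     v2 = edge[1]
--
--     # Check if any vertex from any edge in max_matching contains either of these two vertices
--     for max_edge in max_matching:
--         m1 = max_edge[0]
--         m2 = max_edge[1]
--
--         if m1 == v1 or m1 == v2 \
--                 or m2 == v1 or m2 == v2:
--             return False
--
--     return True
-- ===== SOURCE B (Python) =====
-- def is_valid_match(max_matching: [], edge: []):
--     v1 = edge[0]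
--     v2 = edge[1]
--     # sort all matched endpoints once, then answer each query by binary search
--     verts = sorted(v for me in max_matching for v in (me[0], me[1]))
--     for v in (v1, v2):
--         lo, hi = 0, len(verts)
--         while lo < hi:
--             mid = (lo + hi) // 2
--             if verts[mid] < v:
--                 lo = mid + 1
--             else:
--                 hi = mid
--         if lo < len(verts) and verts[lo] == v:
--             return False
--     return True
-- ===== Notes on version B (the rewrite author's own statement) =====
-- stated objective: alternative
-- what changed: B flattens all matched endpoints, sorts them once, and answers each of the two vertex queries by a hand-written binary search over the sorted array, replacing A's early-exit linear scan with four comparisons per edge.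
-- outside the precondition, e.g. on is_valid_match([[1, 2], [0]], [1, 5]): A returns False, B raises IndexError
import Mathlib
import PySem

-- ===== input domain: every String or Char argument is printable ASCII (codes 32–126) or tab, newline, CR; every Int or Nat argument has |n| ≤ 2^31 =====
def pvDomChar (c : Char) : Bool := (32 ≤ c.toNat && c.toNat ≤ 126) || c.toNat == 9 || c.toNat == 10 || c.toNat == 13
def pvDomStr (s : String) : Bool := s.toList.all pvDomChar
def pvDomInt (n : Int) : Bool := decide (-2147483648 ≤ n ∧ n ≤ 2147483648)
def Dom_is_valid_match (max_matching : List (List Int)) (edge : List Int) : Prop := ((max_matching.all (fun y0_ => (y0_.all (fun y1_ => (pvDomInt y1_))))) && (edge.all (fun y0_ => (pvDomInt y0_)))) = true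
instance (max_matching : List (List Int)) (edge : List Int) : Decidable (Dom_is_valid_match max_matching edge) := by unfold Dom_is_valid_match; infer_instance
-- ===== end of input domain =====

-- B sorts the flattened matched endpoints once and answers the two vertex queries by
-- binary search instead of A's early-exit linear scan (objective: alternative).

-- ===== PORT A =====
def isValidLoop (max_matching : List (List Int)) (v1 v2 : Int) : Bool :=
  match max_matching with
  | [] => true
  | me :: rest =>
    match PySem.List.pyGet? me 0, PySem.List.pyGet? me 1 with
    | some m1, some m2 =>
      if m1 = v1 || m1 = v2 || m2 = v1 || m2 = v2 then false
      else isValidLoop rest v1 v2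
    | _, _ => false   -- IndexError; excluded by Pre_

def is_valid_match (max_matching : List (List Int)) (edge : List Int) : Bool :=
  match PySem.List.pyGet? edge 0, PySem.List.pyGet? edge 1 with
  | some v1, some v2 => isValidLoop max_matching v1 v2
  | _, _ => false   -- IndexError; excluded by Pre_

-- ===== PORT B =====
-- the generator (me[0], me[1] for each matched edge), flattened
def endpointList (max_matching : List (List Int)) : List Int :=
  max_matching.flatMap (fun me =>
    match PySem.List.pyGet? me 0, PySem.List.pyGet? me 1 with
    | some a, some b => [a, b]
    | _, _ => []   -- IndexError; excluded by Pre_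
    )

-- the `while lo < hi` binary-search loop of Source B; lo, hi are provably nonnegative
-- Python ints, kept as Nat; (lo + hi) // 2 on nonnegative ints = Nat division
def bsearchLo (verts : List Int) (v : Int) (lo hi : Nat) : Nat :=
  if lo < hi then
    let mid := (lo + hi) / 2
    match PySem.List.pyGet? verts (mid : Int) with
    | some x => if x < v then bsearchLo verts v (mid + 1) hi else bsearchLo verts v lo mid
    | none => lo   -- unreachable: lo ≤ mid < hi ≤ len verts at every call
  else lo
termination_by hi - lo
decreasing_by all_goals omega

-- `lo, hi = 0, len(verts); while …; if lo < len(verts) and verts[lo] == v`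
def bfound (verts : List Int) (v : Int) : Bool :=
  let lo := bsearchLo verts v 0 verts.length
  if lo < verts.length then
    match PySem.List.pyGet? verts (lo : Int) with
    | some x => x == v
    | none => false   -- unreachable: lo < len verts
  else false

def is_valid_match_alt (max_matching : List (List Int)) (edge : List Int) : Bool :=
  match PySem.List.pyGet? edge 0, PySem.List.pyGet? edge 1 with
  | some v1, some v2 =>
    let verts := PySem.List.sorted (endpointList max_matching) (fun x => x)
    -- `for v in (v1, v2): if found: return False` unrolled over the two queries
    if bfound verts v1 then false
    else if bfound verts v2 then false
    else true
  | _, _ => false   -- IndexError; excluded by Pre_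

-- ===== PRECONDITION & SPEC =====
-- Pre_ excludes inputs where edge or some edge of max_matching has fewer than two
-- elements: there A raises IndexError, or (when the short edge lies after a hit)
-- returns early a value B cannot reach because B's endpoint pass touches every
-- matched edge and raises IndexError itself.
def Pre_is_valid_match (max_matching : List (List Int)) (edge : List Int) : Prop :=
  2 ≤ edge.length ∧ ∀ me ∈ max_matching, 2 ≤ me.length
instance (max_matching : List (List Int)) (edge : List Int) : Decidable (Pre_is_valid_match max_matching edge) := by unfold Pre_is_valid_match; infer_instance

def pvWitness_is_valid_match : List (List Int) × List Int := ([[1, 2], [4, 5]], [3, 4])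

def Spec_is_valid_match (max_matching : List (List Int)) (edge : List Int) (out : Bool) : Prop := out = is_valid_match_alt max_matching edge
instance (max_matching : List (List Int)) (edge : List Int) (out : Bool) : Decidable (Spec_is_valid_match max_matching edge out) := by unfold Spec_is_valid_match; infer_instance

-- ===== CLAIM (what is proved, stated in full; the proofs are below) =====
def Claim_equal_is_valid_match : Prop := ∀ (max_matching : List (List Int)) (edge : List Int), Dom_is_valid_match max_matching edge → Pre_is_valid_match max_matching edge → Spec_is_valid_match max_matching edge (is_valid_match max_matching edge)

-- ===== LEMMAS AND PROOFS =====

theorem pyGet01_cons_cons (a b : Int) (t : List Int) :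
    PySem.List.pyGet? (a :: b :: t) 0 = some a ∧ PySem.List.pyGet? (a :: b :: t) 1 = some b := by
  have h0 : (0:Int) ≤ (t.length:Int) + 1 := by positivity
  constructor <;> simp [PySem.List.pyGet?, PySem.List.pyIdx?, h0]

-- the binary-search loop invariant: the returned lo splits verts into
-- a prefix of elements < v and a suffix of elements ≥ v
theorem bsearchLo_inv (verts : List Int) (v : Int)
    (hs : List.Pairwise (· ≤ ·) verts) :
    ∀ n lo hi, hi - lo = n → lo ≤ hi → hi ≤ verts.length →
    (∀ i (_ : i < verts.length), i < lo → verts[i] < v) →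
    (∀ i (_ : i < verts.length), hi ≤ i → v ≤ verts[i]) →
    bsearchLo verts v lo hi ≤ verts.length ∧
      (∀ i (_ : i < verts.length), i < bsearchLo verts v lo hi → verts[i] < v) ∧
      (∀ i (_ : i < verts.length), bsearchLo verts v lo hi ≤ i → v ≤ verts[i]) := by
  intro n
  induction n using Nat.strong_induction_on with
  | _ n ih =>
    intro lo hi hn hlohi hhi hpre hsuf
    rw [bsearchLo]
    by_cases hlt : lo < hi
    · simp only [hlt, if_true]
      have hmid : (lo + hi) / 2 < verts.length := by omega
      have hget : PySem.List.pyGet? verts (((lo + hi) / 2 : Nat) : Int) = some verts[(lo + hi) / 2] := by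
        rw [PySem.List.pyGet?_natCast]
        exact List.getElem?_eq_getElem hmid
      simp only [hget]
      by_cases hcmp : verts[(lo + hi) / 2] < v
      · simp only [hcmp, if_true]
        refine ih (hi - ((lo + hi) / 2 + 1)) (by omega) _ _ rfl (by omega) hhi ?_ hsuf
        intro i hi' hilt
        have : verts[i] ≤ verts[(lo + hi) / 2] := by
          rcases Nat.lt_or_ge i ((lo + hi) / 2) with h | h
          · exact (List.pairwise_iff_getElem.mp hs) i _ hi' hmid h
          · have : i = (lo + hi) / 2 := by omega
            subst this; exact le_refl _
        omega
      · simp only [hcmp, if_false]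
        refine ih ((lo + hi) / 2 - lo) (by omega) _ _ rfl (by omega) (by omega) hpre ?_
        intro i hi' hge
        have h1 : v ≤ verts[(lo + hi) / 2] := by omega
        have h2 : verts[(lo + hi) / 2] ≤ verts[i] := by
          rcases Nat.lt_or_ge ((lo + hi) / 2) i with h | h
          · exact (List.pairwise_iff_getElem.mp hs) _ i hmid hi' h
          · have : i = (lo + hi) / 2 := by omega
            subst this; exact le_refl _
        omega
    · simp only [hlt, if_false]
      exact ⟨by omega, fun i hi' hIlt => hpre i hi' (by omega),
             fun i hi' hIge => hsuf i hi' (by omega)⟩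

-- on a sorted list, the binary-search membership test decides membership
theorem bfound_iff (verts : List Int) (v : Int)
    (hs : List.Pairwise (· ≤ ·) verts) :
    bfound verts v = true ↔ v ∈ verts := by
  obtain ⟨hle, hpre, hsuf⟩ := bsearchLo_inv verts v hs (verts.length - 0) 0 verts.length
    rfl (Nat.zero_le _) (le_refl _) (by omega) (by intro i hi' h; omega)
  unfold bfound
  set lo := bsearchLo verts v 0 verts.length with hlo
  by_cases h : lo < verts.length
  · have hget : PySem.List.pyGet? verts ((lo : Nat) : Int) = some verts[lo] := by
      rw [PySem.List.pyGet?_natCast]; exact List.getElem?_eq_getElem h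
    simp only [h, if_true, hget, beq_iff_eq]
    constructor
    · intro hv; exact hv ▸ List.getElem_mem h
    · intro hv
      obtain ⟨i, hi', hvi⟩ := List.mem_iff_getElem.mp hv
      have hge : lo ≤ i := by
        by_contra hc
        have := hpre i hi' (by omega)
        omega
    -- verts[lo] ≤ verts[i] = v and v ≤ verts[lo]
      have h1 : v ≤ verts[lo] := hsuf lo h (le_refl _)
      have h2 : verts[lo] ≤ verts[i] := by
        rcases Nat.lt_or_ge lo i with hlt | hge'
        · exact (List.pairwise_iff_getElem.mp hs) lo i h hi' hlt
        · have : i = lo := by omega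
          subst this; exact le_refl _
      omega
  · simp only [h, if_false, Bool.false_eq_true, false_iff]
    intro hv
    obtain ⟨i, hi', hvi⟩ := List.mem_iff_getElem.mp hv
    have := hpre i hi' (by omega)
    omega

-- what the endpoint pass collects
theorem mem_endpointList (max_matching : List (List Int)) (x : Int)
    (h : ∀ me ∈ max_matching, 2 ≤ me.length) :
    x ∈ endpointList max_matching ↔ ∃ me ∈ max_matching, x = me.headI ∨ x = me.tail.headI := by
  unfold endpointList
  rw [List.mem_flatMap]
  constructor
  · rintro ⟨me, hme, hx⟩
    obtain ⟨a, b, t, rfl⟩ : ∃ a b t, me = a :: b :: t := by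
      have := h me hme
      match me with
      | a :: b :: t => exact ⟨a, b, t, rfl⟩
    have hg := pyGet01_cons_cons a b t
    simp only [hg.1, hg.2, List.mem_cons, List.not_mem_nil, or_false] at hx
    rcases hx with rfl | rfl
    · exact ⟨_, hme, Or.inl rfl⟩
    · exact ⟨_, hme, Or.inr rfl⟩
  · rintro ⟨me, hme, hx⟩
    obtain ⟨a, b, t, rfl⟩ : ∃ a b t, me = a :: b :: t := by
      have := h me hme
      match me with
      | a :: b :: t => exact ⟨a, b, t, rfl⟩
    have hg := pyGet01_cons_cons a b t
    refine ⟨a :: b :: t, hme, ?_⟩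
    simp only [hg.1, hg.2]
    simp only [List.headI, List.tail] at hx
    rcases hx with rfl | rfl <;> simp

-- A's scan returns true iff no matched endpoint equals v1 or v2
theorem isValidLoop_iff (max_matching : List (List Int)) (v1 v2 : Int)
    (h : ∀ me ∈ max_matching, 2 ≤ me.length) :
    (isValidLoop max_matching v1 v2 = true ↔
      ∀ me ∈ max_matching, ¬(me.headI = v1 ∨ me.headI = v2 ∨ me.tail.headI = v1 ∨ me.tail.headI = v2)) := by
  induction max_matching with
  | nil => simp [isValidLoop]
  | cons me rest ih =>
    obtain ⟨a, b, t, rfl⟩ : ∃ a b t, me = a :: b :: t := by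
      have := h me (by simp)
      match me with
      | a :: b :: t => exact ⟨a, b, t, rfl⟩
    have hrest : ∀ m ∈ rest, 2 ≤ m.length := fun m hm => h m (by simp [hm])
    have hg := pyGet01_cons_cons a b t
    rw [isValidLoop]
    simp only [hg.1, hg.2]
    split_ifs with hc
    · simp only [false_iff]
      simp only [Bool.or_eq_true, decide_eq_true_eq] at hc
      intro hall
      exact hall (a :: b :: t) (by simp) (by simpa [or_assoc] using hc)
    · rw [ih hrest]
      simp only [Bool.or_eq_true, decide_eq_true_eq, not_or] at hc
      constructor
      · intro hr m hm
        rcases List.mem_cons.mp hm with rfl | hm'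
        · simp only [List.headI, List.tail]
          tauto
        · exact hr m hm'
      · intro hall m hm
        exact hall m (by simp [hm])

-- ===== VERDICT (by name: the statement is the Claim_ definition above) =====
theorem is_valid_match_spec : Claim_equal_is_valid_match := by
  intro max_matching edge _ hpre
  obtain ⟨he, hm⟩ := hpre
  obtain ⟨v1, v2, t, rfl⟩ : ∃ v1 v2 t, edge = v1 :: v2 :: t := by
    match edge with
    | v1 :: v2 :: t => exact ⟨v1, v2, t, rfl⟩
  have hg := pyGet01_cons_cons v1 v2 t
  unfold Spec_is_valid_match is_valid_match is_valid_match_alt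
  simp only [hg.1, hg.2]
  have hs : List.Pairwise (· ≤ ·) (PySem.List.sorted (endpointList max_matching) (fun x => x)) := by
    simpa using PySem.List.sorted_pairwise (endpointList max_matching) (fun x => x)
  have hmem : ∀ v : Int,
      (bfound (PySem.List.sorted (endpointList max_matching) (fun x => x)) v = true ↔
        ∃ me ∈ max_matching, v = me.headI ∨ v = me.tail.headI) := by
    intro v
    rw [bfound_iff _ _ hs, PySem.List.mem_sorted, mem_endpointList _ _ hm]
  rw [Bool.eq_iff_iff]
  rw [isValidLoop_iff max_matching v1 v2 hm]
  constructor
  · intro hall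
    have h1 : bfound (PySem.List.sorted (endpointList max_matching) (fun x => x)) v1 ≠ true := by
      intro hh
      obtain ⟨me, hme, hx⟩ := (hmem v1).mp hh
      rcases hx with hx | hx
      · exact hall me hme (Or.inl hx.symm)
      · exact hall me hme (Or.inr (Or.inr (Or.inl hx.symm)))
    have h2 : bfound (PySem.List.sorted (endpointList max_matching) (fun x => x)) v2 ≠ true := by
      intro hh
      obtain ⟨me, hme, hx⟩ := (hmem v2).mp hh
      rcases hx with hx | hx
      · exact hall me hme (Or.inr (Or.inl hx.symm))
      · exact hall me hme (Or.inr (Or.inr (Or.inr hx.symm)))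
    simp [Bool.not_eq_true] at h1 h2
    simp [h1, h2]
  · intro hb me hme hbad
    by_cases h1 : bfound (PySem.List.sorted (endpointList max_matching) (fun x => x)) v1 = true
    · simp [h1] at hb
    · by_cases h2 : bfound (PySem.List.sorted (endpointList max_matching) (fun x => x)) v2 = true
      · simp [h1, h2] at hb
      · rcases hbad with hx | hx | hx | hx
        · exact h1 ((hmem v1).mpr ⟨me, hme, Or.inl hx.symm⟩)
        · exact h2 ((hmem v2).mpr ⟨me, hme, Or.inl hx.symm⟩)
        · exact h1 ((hmem v1).mpr ⟨me, hme, Or.inr hx.symm⟩)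
        · exact h2 ((hmem v2).mpr ⟨me, hme, Or.inr hx.symm⟩)
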